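-- pv_equiv track=rewrite | github.com/rydersd/ill-tool | src/adobe_mcp/apps/illustrator/production/production_notes.py | _export_notes
-- ===== SOURCE A (Python) =====
-- PRIORITY_ORDER = {"critical": 0, "high": 1, "normal": 2, "low": 3}
--
-- def _export_notes(rig: dict) -> str:
--     """Format all production notes as human-readable text.
--
--     Groups by panel, sorted by priority within each panel.
--     """
--     prod_notes = rig.get("production_notes", {})
--     if not prod_notes:
--         return "No production notes."
--
--     lines: list[str] = []
--     lines.append("=" * 50)
--     lines.append("PRODUCTION NOTES")
--     lines.append("=" * 50)
--
--     # Sort panel numbers numerically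
--     panel_keys = sorted(prod_notes.keys(), key=lambda k: int(k))
--
--     for panel_key in panel_keys:
--         notes = prod_notes[panel_key]
--         if not notes:
--             continue
--
--         lines.append("")
--         lines.append(f"--- Panel {panel_key} ---")
--
--         # Sort by priority (critical first)
--         sorted_notes = sorted(
--             notes,
--             key=lambda n: PRIORITY_ORDER.get(n.get("priority", "normal"), 2),
--         )
--
--         for note in sorted_notes:
--             priority_tag = note.get("priority", "normal").upper()
--             note_type = note.get("type", "direction").upper()
--             content = note.get("note", "")
--             lines.append(f"  [{priority_tag}] ({note_type}) {content}")
--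
--     lines.append("")
--     lines.append("=" * 50)
--     return "\n".join(lines)
-- ===== SOURCE B (Python) =====
-- PRIORITY_ORDER = {"critical": 0, "high": 1, "normal": 2, "low": 3}
--
-- def _export_notes(rig: dict) -> str:
--     """Format all production notes as human-readable text.
--
--     Same output as the sort-based version, but within each panel the notes are
--     distributed once into four priority buckets (stable) instead of key-sorting.
--     """
--     prod_notes = rig.get("production_notes", {})
--     if not prod_notes:
--         return "No production notes."
--
--     bar = "=" * 50
--     parts = [bar, "PRODUCTION NOTES", bar]
--
--     for panel_key in sorted(prod_notes, key=int):
--         buckets = ([], [], [], [])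
--         for note in prod_notes[panel_key]:
--             buckets[PRIORITY_ORDER.get(note.get("priority", "normal"), 2)].append(
--                 "  [%s] (%s) %s" % (
--                     note.get("priority", "normal").upper(),
--                     note.get("type", "direction").upper(),
--                     note.get("note", ""),
--                 )
--             )
--         if any(buckets):
--             parts.append("")
--             parts.append("--- Panel %s ---" % panel_key)
--             for bucket in buckets:
--                 parts.extend(bucket)
--
--     parts.append("")
--     parts.append(bar)
--     return "\n".join(parts)
-- ===== Notes on version B (the rewrite author's own statement) =====
-- stated objective: alternative
-- what changed: Within each panel, the stable sorted() call with a priority key is replaced by a single stable distribution of the notes (formatted on the fly) into four ordered priority buckets that are then emitted in order 0..3.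
import Mathlib
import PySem

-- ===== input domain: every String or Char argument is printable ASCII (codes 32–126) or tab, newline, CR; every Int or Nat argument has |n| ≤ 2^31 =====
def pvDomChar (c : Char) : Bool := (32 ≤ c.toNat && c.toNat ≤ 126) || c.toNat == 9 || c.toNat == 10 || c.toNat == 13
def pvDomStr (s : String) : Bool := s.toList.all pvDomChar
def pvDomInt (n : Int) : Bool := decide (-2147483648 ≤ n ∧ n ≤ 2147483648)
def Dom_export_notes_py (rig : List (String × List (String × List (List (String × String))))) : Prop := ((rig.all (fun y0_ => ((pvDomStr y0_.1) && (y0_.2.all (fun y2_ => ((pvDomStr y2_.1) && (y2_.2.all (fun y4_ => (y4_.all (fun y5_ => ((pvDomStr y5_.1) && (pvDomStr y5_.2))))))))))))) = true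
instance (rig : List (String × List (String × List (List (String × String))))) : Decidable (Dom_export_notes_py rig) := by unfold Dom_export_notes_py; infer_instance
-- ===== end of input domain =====

-- B replaces the stable priority-key sort inside each panel by a single stable
-- distribution of the notes into four priority buckets emitted in order (objective: alternative).

-- shared helpers (identical expressions in both Python versions)
def PRIORITY_ORDER : PySem.Dict String Int :=
  PySem.Dict.mk [("critical", 0), ("high", 1), ("normal", 2), ("low", 3)]

-- "=" * 50
def pvBar : String := String.ofList (PySem.List.pyRepeat ['='] 50)

-- note.get(k, dflt) — dict lookup, first match
def noteGet (note : List (String × String)) (k : String) (dflt : String) : String :=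
  PySem.Dict.getD (PySem.Dict.mk note) k dflt

-- PRIORITY_ORDER.get(note.get("priority", "normal"), 2) — the sort key / bucket index
def prioIdx (note : List (String × String)) : Int :=
  PySem.Dict.getD PRIORITY_ORDER (noteGet note "priority" "normal") 2

-- f"  [{priority_tag}] ({note_type}) {content}" — same f-string in A and B
def noteLine (note : List (String × String)) : String :=
  PySem.Str.join "" ["  [", PySem.Str.upper (noteGet note "priority" "normal"),
                     "] (", PySem.Str.upper (noteGet note "type" "direction"),
                     ") ", noteGet note "note" ""]

-- f"--- Panel {panel_key} ---"
def panelHeader (pk : String) : String := PySem.Str.join "" ["--- Panel ", pk, " ---"]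

-- sorted(prod_notes.keys(), key=int); int(k) is exact here because
-- Pre_export_notes_py guarantees int(k) succeeds on every panel key (the .getD 0 is never taken)
def sortedPanelKeys (pn : List (String × List (List (String × String)))) : List String :=
  PySem.List.sorted ((PySem.Dict.mk pn).keys) (fun k => (PySem.Int.ofStr? k).getD 0) false

-- ===== PORT A =====
def export_notes_py (rig : List (String × List (String × List (List (String × String))))) : String :=
  let prodNotes := PySem.Dict.getD (PySem.Dict.mk rig) "production_notes" []
  if prodNotes.isEmpty then "No production notes."
  else
    let lines : List String := [pvBar, "PRODUCTION NOTES", pvBar]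
    let lines := (sortedPanelKeys prodNotes).foldl (fun lines pk =>
      -- prod_notes[panel_key]: the key comes from the dict itself, so getD is exact
      let notes := PySem.Dict.getD (PySem.Dict.mk prodNotes) pk []
      if notes.isEmpty then lines
      else
        (PySem.List.sorted notes prioIdx false).foldl
          (fun acc note => acc ++ [noteLine note])
          (lines ++ ["", panelHeader pk])) lines
    PySem.Str.join "\n" (lines ++ ["", pvBar])

-- ===== PORT B =====
-- buckets[idx].append(line): idx ∈ {0,1,2,3}, ported as the four-way branch on idx
def pushNote (bs : List String × List String × List String × List String)
    (note : List (String × String)) : List String × List String × List String × List String :=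
  let idx := prioIdx note
  if idx == 0 then (bs.1 ++ [noteLine note], bs.2.1, bs.2.2.1, bs.2.2.2)
  else if idx == 1 then (bs.1, bs.2.1 ++ [noteLine note], bs.2.2.1, bs.2.2.2)
  else if idx == 2 then (bs.1, bs.2.1, bs.2.2.1 ++ [noteLine note], bs.2.2.2)
  else (bs.1, bs.2.1, bs.2.2.1, bs.2.2.2 ++ [noteLine note])

def export_notes_py_alt (rig : List (String × List (String × List (List (String × String))))) : String :=
  let prodNotes := PySem.Dict.getD (PySem.Dict.mk rig) "production_notes" []
  if prodNotes.isEmpty then "No production notes."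
  else
    let parts := (sortedPanelKeys prodNotes).foldl (fun parts pk =>
      let bs := (PySem.Dict.getD (PySem.Dict.mk prodNotes) pk []).foldl pushNote ([], [], [], [])
      -- if any(buckets): some bucket non-empty
      if bs.1.isEmpty && bs.2.1.isEmpty && bs.2.2.1.isEmpty && bs.2.2.2.isEmpty then parts
      else parts ++ (["", panelHeader pk] ++ (bs.1 ++ (bs.2.1 ++ (bs.2.2.1 ++ bs.2.2.2)))))
      [pvBar, "PRODUCTION NOTES", pvBar]
    PySem.Str.join "\n" (parts ++ ["", pvBar])

-- ===== PRECONDITION & SPEC =====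
-- Pre_ excludes exactly the inputs where A raises ValueError: a panel key that int() cannot parse.
def Pre_export_notes_py (rig : List (String × List (String × List (List (String × String))))) : Prop :=
  ∀ p ∈ PySem.Dict.getD (PySem.Dict.mk rig) "production_notes" [], (PySem.Int.ofStr? p.1).isSome = true
instance (rig : List (String × List (String × List (List (String × String))))) : Decidable (Pre_export_notes_py rig) := by unfold Pre_export_notes_py; infer_instance

def pvWitness_export_notes_py : (List (String × List (String × List (List (String × String))))) :=
  [("production_notes", [("2", [[("priority", "high"), ("note", "fix")], [("note", "x")]]), ("1", [])])]

def Spec_export_notes_py (rig : List (String × List (String × List (List (String × String))))) (out : String) : Prop := out = export_notes_py_alt rig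
instance (rig : List (String × List (String × List (List (String × String))))) (out : String) : Decidable (Spec_export_notes_py rig out) := by unfold Spec_export_notes_py; infer_instance

-- ===== CLAIM (what is proved, stated in full; the proofs are below) =====
def Claim_equal_export_notes_py : Prop := ∀ (rig : List (String × List (String × List (List (String × String))))), Dom_export_notes_py rig → Pre_export_notes_py rig → Spec_export_notes_py rig (export_notes_py rig)

-- ===== LEMMAS AND PROOFS =====

-- the four priority buckets of a panel's note list
def pvF (i : Int) (xs : List (List (String × String))) : List (List (String × String)) :=
  xs.filter (fun n => prioIdx n == i)

lemma prioIdx_cases (n : List (String × String)) :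
    prioIdx n = 0 ∨ prioIdx n = 1 ∨ prioIdx n = 2 ∨ prioIdx n = 3 := by
  unfold prioIdx PRIORITY_ORDER
  rw [PySem.Dict.getD_eq_get?_getD]
  simp only [PySem.Dict.get?_mk_cons]
  split_ifs <;> simp [PySem.Dict.get?]

lemma insertBy_mid {α : Type} (before : α → α → Bool) (x : α) (pre post : List α)
    (h1 : ∀ y ∈ pre, before x y = false) (h2 : ∀ y ∈ post, before x y = true) :
    PySem.List.insertBy before x (pre ++ post) = pre ++ x :: post := by
  induction pre with
  | nil =>
    cases post with
    | nil => simp [PySem.List.insertBy]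
    | cons p ps => simp [PySem.List.insertBy, h2 p (by simp)]
  | cons a t ih =>
    have ha : before x a = false := h1 a (by simp)
    simp [PySem.List.insertBy, ha, ih (fun y hy => h1 y (by simp [hy]))]

lemma fold_ins (xs : List (List (String × String))) (a0 a1 a2 a3 : List (List (String × String)))
    (h0 : ∀ y ∈ a0, prioIdx y = 0) (h1 : ∀ y ∈ a1, prioIdx y = 1)
    (h2 : ∀ y ∈ a2, prioIdx y = 2) (h3 : ∀ y ∈ a3, prioIdx y = 3) :
    xs.foldl (fun acc x => PySem.List.insertBy (fun a b => decide (prioIdx a < prioIdx b)) x acc)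
        (a0 ++ (a1 ++ (a2 ++ a3)))
      = (a0 ++ pvF 0 xs) ++ ((a1 ++ pvF 1 xs) ++ ((a2 ++ pvF 2 xs) ++ (a3 ++ pvF 3 xs))) := by
  induction xs generalizing a0 a1 a2 a3 with
  | nil => simp [pvF]
  | cons x t ih =>
    simp only [List.foldl_cons]
    rcases prioIdx_cases x with hx | hx | hx | hx
    · have : PySem.List.insertBy (fun a b => decide (prioIdx a < prioIdx b)) x (a0 ++ (a1 ++ (a2 ++ a3)))
          = a0 ++ (x :: (a1 ++ (a2 ++ a3))) := by
        apply insertBy_mid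
        · intro y hy; simp [h0 y hy, hx]
        · intro y hy
          rcases List.mem_append.1 hy with hy | hy
          · simp [h1 y hy, hx]
          · rcases List.mem_append.1 hy with hy | hy
            · simp [h2 y hy, hx]
            · simp [h3 y hy, hx]
      rw [this]
      have := ih (a0 ++ [x]) a1 a2 a3
        (by intro y hy; rcases List.mem_append.1 hy with hy | hy
            · exact h0 y hy
            · simp at hy; simpa [hy] using hx) h1 h2 h3
      simp only [List.append_assoc, List.singleton_append] at this ⊢
      rw [this]
      simp [pvF, hx]
    · have : PySem.List.insertBy (fun a b => decide (prioIdx a < prioIdx b)) x (a0 ++ (a1 ++ (a2 ++ a3)))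
          = a0 ++ (a1 ++ (x :: (a2 ++ a3))) := by
        rw [show a0 ++ (a1 ++ (a2 ++ a3)) = (a0 ++ a1) ++ (a2 ++ a3) by simp,
            insertBy_mid _ _ (a0 ++ a1) (a2 ++ a3)]
        · simp
        · intro y hy
          rcases List.mem_append.1 hy with hy | hy
          · simp [h0 y hy, hx]
          · simp [h1 y hy, hx]
        · intro y hy
          rcases List.mem_append.1 hy with hy | hy
          · simp [h2 y hy, hx]
          · simp [h3 y hy, hx]
      rw [this]
      have := ih a0 (a1 ++ [x]) a2 a3 h0
        (by intro y hy; rcases List.mem_append.1 hy with hy | hy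
            · exact h1 y hy
            · simp at hy; simpa [hy] using hx) h2 h3
      simp only [List.append_assoc, List.singleton_append] at this ⊢
      rw [this]
      simp [pvF, hx]
    · have : PySem.List.insertBy (fun a b => decide (prioIdx a < prioIdx b)) x (a0 ++ (a1 ++ (a2 ++ a3)))
          = a0 ++ (a1 ++ (a2 ++ (x :: a3))) := by
        rw [show a0 ++ (a1 ++ (a2 ++ a3)) = (a0 ++ (a1 ++ a2)) ++ a3 by simp,
            insertBy_mid _ _ (a0 ++ (a1 ++ a2)) a3]
        · simp
        · intro y hy
          rcases List.mem_append.1 hy with hy | hy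
          · simp [h0 y hy, hx]
          · rcases List.mem_append.1 hy with hy | hy
            · simp [h1 y hy, hx]
            · simp [h2 y hy, hx]
        · intro y hy; simp [h3 y hy, hx]
      rw [this]
      have := ih a0 a1 (a2 ++ [x]) a3 h0 h1
        (by intro y hy; rcases List.mem_append.1 hy with hy | hy
            · exact h2 y hy
            · simp at hy; simpa [hy] using hx) h3
      simp only [List.append_assoc, List.singleton_append] at this ⊢
      rw [this]
      simp [pvF, hx]
    · have : PySem.List.insertBy (fun a b => decide (prioIdx a < prioIdx b)) x (a0 ++ (a1 ++ (a2 ++ a3)))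
          = a0 ++ (a1 ++ (a2 ++ (a3 ++ [x]))) := by
        rw [show a0 ++ (a1 ++ (a2 ++ a3)) = (a0 ++ (a1 ++ (a2 ++ a3))) ++ [] by simp,
            insertBy_mid _ _ (a0 ++ (a1 ++ (a2 ++ a3))) []]
        · simp
        · intro y hy
          rcases List.mem_append.1 hy with hy | hy
          · simp [h0 y hy, hx]
          · rcases List.mem_append.1 hy with hy | hy
            · simp [h1 y hy, hx]
            · rcases List.mem_append.1 hy with hy | hy
              · simp [h2 y hy, hx]
              · simp [h3 y hy, hx]
        · intro y hy; simp at hy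
      rw [this]
      have := ih a0 a1 a2 (a3 ++ [x]) h0 h1 h2
        (by intro y hy; rcases List.mem_append.1 hy with hy | hy
            · exact h3 y hy
            · simp at hy; simpa [hy] using hx)
      simp only [List.append_assoc, List.singleton_append] at this ⊢
      rw [this]
      simp [pvF, hx]

lemma sorted_eq_buckets (xs : List (List (String × String))) :
    PySem.List.sorted xs prioIdx false = pvF 0 xs ++ (pvF 1 xs ++ (pvF 2 xs ++ pvF 3 xs)) := by
  rw [PySem.List.sorted_eq_foldl_insertBy]
  simpa using fold_ins xs [] [] [] [] (by simp) (by simp) (by simp) (by simp)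

lemma bucket_fold (xs : List (List (String × String))) (b0 b1 b2 b3 : List String) :
    xs.foldl pushNote (b0, b1, b2, b3)
      = (b0 ++ (pvF 0 xs).map noteLine, b1 ++ (pvF 1 xs).map noteLine,
         b2 ++ (pvF 2 xs).map noteLine, b3 ++ (pvF 3 xs).map noteLine) := by
  induction xs generalizing b0 b1 b2 b3 with
  | nil => simp [pvF]
  | cons x t ih =>
    simp only [List.foldl_cons]
    rcases prioIdx_cases x with hx | hx | hx | hx <;>
      simp [pushNote, hx, ih, pvF]

lemma panel_eq (prodNotes : List (String × List (List (String × String)))) (lines : List String) (pk : String) :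
    (let notes := PySem.Dict.getD (PySem.Dict.mk prodNotes) pk []
     if notes.isEmpty then lines
     else (PySem.List.sorted notes prioIdx false).foldl
        (fun acc note => acc ++ [noteLine note]) (lines ++ ["", panelHeader pk]))
    = (let bs := (PySem.Dict.getD (PySem.Dict.mk prodNotes) pk []).foldl pushNote ([], [], [], [])
       if bs.1.isEmpty && bs.2.1.isEmpty && bs.2.2.1.isEmpty && bs.2.2.2.isEmpty then lines
       else lines ++ (["", panelHeader pk] ++ (bs.1 ++ (bs.2.1 ++ (bs.2.2.1 ++ bs.2.2.2))))) := by
  set notes := PySem.Dict.getD (PySem.Dict.mk prodNotes) pk [] with hn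
  simp only [bucket_fold notes [] [] [] [], List.nil_append]
  cases notes with
  | nil => simp [pvF]
  | cons n t =>
    have hfalse : (((pvF 0 (n :: t)).map noteLine).isEmpty && ((pvF 1 (n :: t)).map noteLine).isEmpty
        && ((pvF 2 (n :: t)).map noteLine).isEmpty && ((pvF 3 (n :: t)).map noteLine).isEmpty) = false := by
      rcases prioIdx_cases n with hx | hx | hx | hx
      · have hj : ((pvF 0 (n :: t)).map noteLine).isEmpty = false := by simp [pvF, hx]
        simp only [hj, Bool.false_and]
      · have hj : ((pvF 1 (n :: t)).map noteLine).isEmpty = false := by simp [pvF, hx]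
        simp only [hj, Bool.and_false, Bool.false_and]
      · have hj : ((pvF 2 (n :: t)).map noteLine).isEmpty = false := by simp [pvF, hx]
        simp only [hj, Bool.and_false, Bool.false_and]
      · have hj : ((pvF 3 (n :: t)).map noteLine).isEmpty = false := by simp [pvF, hx]
        simp only [hj, Bool.and_false]
    simp only [List.isEmpty_cons, Bool.false_eq_true, if_false, hfalse,
      PySem.List.foldl_append_singleton_eq_map, sorted_eq_buckets]
    simp

-- ===== VERDICT (by name: the statement is the Claim_ definition above) =====
theorem export_notes_py_spec : Claim_equal_export_notes_py := by
  intro rig _ _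
  unfold Spec_export_notes_py export_notes_py export_notes_py_alt
  set prodNotes := PySem.Dict.getD (PySem.Dict.mk rig) "production_notes" []
  cases h : prodNotes.isEmpty with
  | true => simp [h]
  | false =>
    simp only [h, Bool.false_eq_true, if_false]
    congr 2
    apply PySem.List.foldl_congr_mem
    intro acc pk _
    exact panel_eq prodNotes acc pk
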